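-- pv_equiv track=rewrite | github.com/Ducksick007/-api | app.py | format_data_as_html
-- ===== SOURCE A (Python) =====
-- def format_data_as_html(data):
--     if not data:
--         return "<p>No data available</p>"
--
--     # Split the data into lines
--     lines = data.split('\n')
--
--     # Initialize variables
--     name = ""
--     address = ""
--     phone = ""
--
--     # Extract data
--     for line in lines:
--         if line.startswith("Name: "):
--             name = line[6:]
--         elif line.startswith("Address: "):
--             address = line[9:]
--         elif line.startswith("Tel: "):
--             phone = line[5:]
--
--     # Create HTML
--     html = f"<p><strong>Name:</strong> {name}</p>"
--     html += f"<p><strong>Address:</strong> {address}</p>"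
--     html += f"<p><strong>Phone:</strong> {phone}</p>"
--
--     return html
-- ===== SOURCE B (Python) =====
-- def format_data_as_html(data):
--     if not data:
--         return "<p>No data available</p>"
--
--     # Scan the lines in reverse: the first match found (per field) is the
--     # last matching line of the text, so last-match-wins is preserved.
--     # Stop as soon as all three fields are found.
--     name = None
--     address = None
--     phone = None
--     for line in reversed(data.split('\n')):
--         if line.startswith("Name: "):
--             if name is None:
--                 name = line[6:]
--         elif line.startswith("Address: "):
--             if address is None:
--                 address = line[9:]
--         elif line.startswith("Tel: "):
--             if phone is None:
--                 phone = line[5:]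
--         if name is not None and address is not None and phone is not None:
--             break
--
--     name = name if name is not None else ""
--     address = address if address is not None else ""
--     phone = phone if phone is not None else ""
--     return (f"<p><strong>Name:</strong> {name}</p>"
--             f"<p><strong>Address:</strong> {address}</p>"
--             f"<p><strong>Phone:</strong> {phone}</p>")
-- ===== Notes on version B (the rewrite author's own statement) =====
-- stated objective: alternative
-- what changed: Replaces the forward overwrite-on-every-match loop with a reverse scan that keeps the first match per field (equivalent to last-match-wins) and breaks early once all three fields are found, using None sentinels instead of empty-string defaults.
import Mathlib
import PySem

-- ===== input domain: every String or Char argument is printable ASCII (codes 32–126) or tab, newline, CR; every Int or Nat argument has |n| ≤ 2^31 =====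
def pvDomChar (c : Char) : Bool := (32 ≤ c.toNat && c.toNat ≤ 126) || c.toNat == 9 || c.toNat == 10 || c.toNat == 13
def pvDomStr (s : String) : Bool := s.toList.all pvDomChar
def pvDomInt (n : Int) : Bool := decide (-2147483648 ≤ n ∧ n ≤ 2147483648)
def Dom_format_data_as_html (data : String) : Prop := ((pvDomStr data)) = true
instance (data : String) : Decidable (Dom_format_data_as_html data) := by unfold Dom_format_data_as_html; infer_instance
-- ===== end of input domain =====

-- B replaces A's forward overwrite-on-match loop by a reverse scan keeping the
-- first match per field (same last-match-wins result) with an early break;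
-- alternative decomposition, same asymptotic cost.


-- ===== PORT A =====
-- A's for-loop over the lines, carrying (name, address, phone)
def pvStepA (s : String × String × String) (line : String) : String × String × String :=
  if PySem.Str.startswith line "Name: " then (PySem.Str.slice line (some 6) none, s.2.1, s.2.2)
  else if PySem.Str.startswith line "Address: " then (s.1, PySem.Str.slice line (some 9) none, s.2.2)
  else if PySem.Str.startswith line "Tel: " then (s.1, s.2.1, PySem.Str.slice line (some 5) none)
  else s

def format_data_as_html (data : String) : String :=
  if data = "" then "<p>No data available</p>"
  else
    -- data.split('\n'): separator is non-empty so split? is always `some`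
    let lines := (PySem.Str.split? data "\n").getD []
    let res := lines.foldl pvStepA ("", "", "")
    "<p><strong>Name:</strong> " ++ res.1 ++ "</p>"
      ++ ("<p><strong>Address:</strong> " ++ res.2.1 ++ "</p>")
      ++ ("<p><strong>Phone:</strong> " ++ res.2.2 ++ "</p>")

-- ===== PORT B =====
-- B's reverse scan: first match per field wins, break once all three are found
def pvLoopB : List String → Option String → Option String → Option String →
    Option String × Option String × Option String
  | [], n, a, p => (n, a, p)
  | line :: rest, n, a, p =>
    let n' := if PySem.Str.startswith line "Name: " then
                (if n.isNone then some (PySem.Str.slice line (some 6) none) else n) else n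
    let a' := if !PySem.Str.startswith line "Name: " ∧ PySem.Str.startswith line "Address: " then
                (if a.isNone then some (PySem.Str.slice line (some 9) none) else a) else a
    let p' := if !PySem.Str.startswith line "Name: " ∧ !PySem.Str.startswith line "Address: "
                 ∧ PySem.Str.startswith line "Tel: " then
                (if p.isNone then some (PySem.Str.slice line (some 5) none) else p) else p
    if n'.isSome && a'.isSome && p'.isSome then (n', a', p') else pvLoopB rest n' a' p'

def format_data_as_html_alt (data : String) : String :=
  if data = "" then "<p>No data available</p>"
  else
    let lines := (PySem.Str.split? data "\n").getD []
    let res := pvLoopB lines.reverse none none none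
    let name := match res.1 with | some v => v | none => ""
    let address := match res.2.1 with | some v => v | none => ""
    let phone := match res.2.2 with | some v => v | none => ""
    "<p><strong>Name:</strong> " ++ name ++ "</p>"
      ++ "<p><strong>Address:</strong> " ++ address ++ "</p>"
      ++ "<p><strong>Phone:</strong> " ++ phone ++ "</p>"

-- ===== PRECONDITION & SPEC =====
def Spec_format_data_as_html (data : String) (out : String) : Prop := out = format_data_as_html_alt data
instance (data : String) (out : String) : Decidable (Spec_format_data_as_html data out) := by unfold Spec_format_data_as_html; infer_instance

-- ===== CLAIM (what is proved, stated in full; the proofs are below) =====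
def Claim_equal_format_data_as_html : Prop := ∀ (data : String), Dom_format_data_as_html data → Spec_format_data_as_html data (format_data_as_html data)

-- ===== LEMMAS AND PROOFS =====
-- effective per-field predicates of the elif chain, and the field extractors
def pvP1 (line : String) : Bool := PySem.Str.startswith line "Name: "
def pvP2 (line : String) : Bool := !PySem.Str.startswith line "Name: " && PySem.Str.startswith line "Address: "
def pvP3 (line : String) : Bool := !PySem.Str.startswith line "Name: " && !PySem.Str.startswith line "Address: " && PySem.Str.startswith line "Tel: "
def pvE1 (line : String) : String := PySem.Str.slice line (some 6) none
def pvE2 (line : String) : String := PySem.Str.slice line (some 9) none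
def pvE3 (line : String) : String := PySem.Str.slice line (some 5) none

-- first p-match in l (extracted), else the default
def pvPick (p : String → Bool) (e : String → String) (l : List String) (d : String) : String :=
  match l.find? p with
  | some x => e x
  | none => d

def pvPickO (p : String → Bool) (e : String → String) (l : List String) (x : Option String) : Option String :=
  x.or ((l.find? p).map e)

theorem pvStepA_fst (s : String × String × String) (line : String) :
    (pvStepA s line).1 = if pvP1 line then pvE1 line else s.1 := by
  simp only [pvStepA, pvP1, pvE1]; split_ifs with h1 h2 h3 <;> simp_all

theorem pvStepA_snd (s : String × String × String) (line : String) :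
    (pvStepA s line).2.1 = if pvP2 line then pvE2 line else s.2.1 := by
  simp only [pvStepA, pvP2, pvE2]; split_ifs with h1 h2 h3 <;> simp_all

theorem pvStepA_thd (s : String × String × String) (line : String) :
    (pvStepA s line).2.2 = if pvP3 line then pvE3 line else s.2.2 := by
  simp only [pvStepA, pvP3, pvE3]; split_ifs with h1 h2 h3 <;> simp_all

theorem pvPick_append_singleton (p : String → Bool) (e : String → String)
    (l : List String) (line : String) (d : String) :
    pvPick p e (l ++ [line]) d = pvPick p e l (if p line then e line else d) := by
  simp only [pvPick, List.find?_append]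
  cases h : l.find? p with
  | some x => simp
  | none =>
    simp only [Option.none_or, List.find?]
    split_ifs with hp <;> simp [hp]

theorem pvFoldA_spec (l : List String) (s : String × String × String) :
    l.foldl pvStepA s =
      (pvPick pvP1 pvE1 l.reverse s.1, pvPick pvP2 pvE2 l.reverse s.2.1,
       pvPick pvP3 pvE3 l.reverse s.2.2) := by
  induction l generalizing s with
  | nil => simp [pvPick]
  | cons line rest ih =>
    simp only [List.foldl_cons, List.reverse_cons, ih, pvPick_append_singleton,
      pvStepA_fst, pvStepA_snd, pvStepA_thd]

theorem pvPickO_cons (p : String → Bool) (e : String → String)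
    (line : String) (rest : List String) (x : Option String) :
    pvPickO p e (line :: rest) x
      = pvPickO p e rest (if x.isNone && p line then some (e line) else x) := by
  cases x with
  | some v => simp [pvPickO]
  | none =>
    simp only [pvPickO, Option.isNone_none, Bool.true_and, List.find?]
    split_ifs with hp <;> simp [hp]

theorem pvPickO_of_isSome (p : String → Bool) (e : String → String) (l : List String)
    (x : Option String) (h : x.isSome = true) : pvPickO p e l x = x := by
  cases x with
  | some v => simp [pvPickO]
  | none => simp at h

theorem pvLoopB_spec (l : List String) (n a p : Option String) :
    pvLoopB l n a p = (pvPickO pvP1 pvE1 l n, pvPickO pvP2 pvE2 l a, pvPickO pvP3 pvE3 l p) := by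
  induction l generalizing n a p with
  | nil => cases n <;> cases a <;> cases p <;> simp [pvLoopB, pvPickO]
  | cons line rest ih =>
    rw [pvLoopB]
    have e1 : (if PySem.Str.startswith line "Name: " then
        (if n.isNone then some (PySem.Str.slice line (some 6) none) else n) else n)
        = if n.isNone && pvP1 line then some (pvE1 line) else n := by
      cases n <;> simp [pvP1, pvE1]
    have e2 : (if !PySem.Str.startswith line "Name: " ∧ PySem.Str.startswith line "Address: " then
        (if a.isNone then some (PySem.Str.slice line (some 9) none) else a) else a)
        = if a.isNone && pvP2 line then some (pvE2 line) else a := by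
      cases a <;> simp [pvP2, pvE2]
    have e3 : (if !PySem.Str.startswith line "Name: " ∧ !PySem.Str.startswith line "Address: "
          ∧ PySem.Str.startswith line "Tel: " then
        (if p.isNone then some (PySem.Str.slice line (some 5) none) else p) else p)
        = if p.isNone && pvP3 line then some (pvE3 line) else p := by
      cases p <;> simp [pvP3, pvE3, and_assoc]
    rw [e1, e2, e3,
      pvPickO_cons pvP1 pvE1 line rest n, pvPickO_cons pvP2 pvE2 line rest a,
      pvPickO_cons pvP3 pvE3 line rest p]
    generalize (if n.isNone && pvP1 line then some (pvE1 line) else n) = n'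
    generalize (if a.isNone && pvP2 line then some (pvE2 line) else a) = a'
    generalize (if p.isNone && pvP3 line then some (pvE3 line) else p) = p'
    by_cases hall : (n'.isSome && a'.isSome && p'.isSome) = true
    · rw [if_pos hall]
      simp only [Bool.and_eq_true] at hall
      rw [pvPickO_of_isSome _ _ _ _ hall.1.1, pvPickO_of_isSome _ _ _ _ hall.1.2,
        pvPickO_of_isSome _ _ _ _ hall.2]
    · rw [if_neg hall]; exact ih n' a' p'

theorem pvPickO_getD (p : String → Bool) (e : String → String) (l : List String) :
    (match pvPickO p e l none with | some v => v | none => "") = pvPick p e l "" := by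
  simp only [pvPickO, pvPick, Option.none_or]
  cases l.find? p <;> simp

-- ===== VERDICT (by name: the statement is the Claim_ definition above) =====
theorem format_data_as_html_spec : Claim_equal_format_data_as_html := by
  intro data _
  unfold Spec_format_data_as_html format_data_as_html format_data_as_html_alt
  split_ifs with h
  · rfl
  · simp only [pvFoldA_spec, pvLoopB_spec, pvPickO_getD, String.append_assoc]
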